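-- pv_equiv track=rewrite | github.com/cart-inception/pycraft | engine/world.py | _get_chunks_in_radius
-- ===== SOURCE A (Python) =====
-- from typing import Dict, Optional, Tuple, List, Set
--
-- def _get_chunks_in_radius(center_x: int, center_z: int, radius: int) -> List[Tuple[int, int]]:
--     """
--     Get all chunk positions within specified radius using concentric circles.
--
--     Args:
--         center_x, center_z: Center chunk coordinates
--         radius: Radius in chunks
--
--     Returns:
--         List of chunk coordinates sorted by distance from center
--     """
--     chunks = []
--
--     # Load chunks in concentric circles (closest first)
--     for dist in range(radius + 1):
--         # Add chunks at current distance
--         for dx in range(-dist, dist + 1):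
--             for dz in range(-dist, dist + 1):
--                 # Only add chunks on the current circle boundary
--                 if abs(dx) == dist or abs(dz) == dist:
--                     chunk_x = center_x + dx
--                     chunk_z = center_z + dz
--                     chunks.append((chunk_x, chunk_z))
--
--     # Sort by distance from center
--     chunks.sort(key=lambda pos: (
--         (pos[0] - center_x) ** 2 + (pos[1] - center_z) ** 2
--     ))
--
--     return chunks
-- ===== SOURCE B (Python) =====
-- def _get_chunks_in_radius(center_x, center_z, radius):
--     # Generate only the ring boundary cells directly (no full-square scan),
--     # in the same order A visits them, then stable-sort by distance squared.
--     chunks = []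
--     for dist in range(radius + 1):
--         if dist == 0:
--             chunks.append((center_x, center_z))
--         else:
--             for dz in range(-dist, dist + 1):
--                 chunks.append((center_x - dist, center_z + dz))
--             for dx in range(-dist + 1, dist):
--                 chunks.append((center_x + dx, center_z - dist))
--                 chunks.append((center_x + dx, center_z + dist))
--             for dz in range(-dist, dist + 1):
--                 chunks.append((center_x + dist, center_z + dz))
--     chunks.sort(key=lambda pos: (pos[0] - center_x) ** 2 + (pos[1] - center_z) ** 2)
--     return chunks
-- ===== Notes on version B (the rewrite author's own statement) =====
-- stated objective: faster
-- what changed: B emits only the ring-boundary cells of each concentric ring directly (left column, two cells per middle row, right column) in A's visit order instead of scanning the full (2d+1)x(2d+1) square with a boundary test per ring, then applies the same stable distance-squared sort.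
import Mathlib
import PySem

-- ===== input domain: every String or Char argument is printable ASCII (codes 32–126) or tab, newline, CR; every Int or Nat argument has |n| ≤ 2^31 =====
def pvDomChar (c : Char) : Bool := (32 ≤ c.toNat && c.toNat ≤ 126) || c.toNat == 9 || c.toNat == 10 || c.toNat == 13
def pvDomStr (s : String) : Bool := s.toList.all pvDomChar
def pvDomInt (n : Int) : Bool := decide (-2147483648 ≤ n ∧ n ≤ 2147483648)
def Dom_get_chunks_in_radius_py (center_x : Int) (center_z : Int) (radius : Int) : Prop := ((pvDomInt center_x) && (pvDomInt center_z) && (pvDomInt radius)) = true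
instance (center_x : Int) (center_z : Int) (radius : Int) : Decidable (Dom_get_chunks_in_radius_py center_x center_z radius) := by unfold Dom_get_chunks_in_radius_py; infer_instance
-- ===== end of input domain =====

-- B replaces A's full-square scan per ring (O(radius^3) total) by emitting only the
-- ring-boundary cells directly in the same order before the same stable sort (O(radius^2 log radius)).

-- ===== PORT A =====
def get_chunks_in_radius_py (center_x : Int) (center_z : Int) (radius : Int) : List (Int × Int) :=
  let chunks : List (Int × Int) :=
    (PySem.List.pyRange 0 (radius + 1) 1).foldl (fun acc dist =>
      (PySem.List.pyRange (-dist) (dist + 1) 1).foldl (fun acc dx =>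
        (PySem.List.pyRange (-dist) (dist + 1) 1).foldl (fun acc dz =>
          if |dx| = dist ∨ |dz| = dist then
            acc ++ [(center_x + dx, center_z + dz)]
          else acc) acc) acc) []
  PySem.List.sorted chunks (fun pos => (pos.1 - center_x) ^ 2 + (pos.2 - center_z) ^ 2) false

-- ===== PORT B =====
def get_chunks_in_radius_py_alt (center_x : Int) (center_z : Int) (radius : Int) : List (Int × Int) :=
  let chunks : List (Int × Int) :=
    (PySem.List.pyRange 0 (radius + 1) 1).foldl (fun acc dist =>
      if dist = 0 then acc ++ [(center_x, center_z)]
      else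
        let acc := (PySem.List.pyRange (-dist) (dist + 1) 1).foldl
          (fun acc dz => acc ++ [(center_x - dist, center_z + dz)]) acc
        let acc := (PySem.List.pyRange (-dist + 1) dist 1).foldl
          (fun acc dx => acc ++ [(center_x + dx, center_z - dist), (center_x + dx, center_z + dist)]) acc
        (PySem.List.pyRange (-dist) (dist + 1) 1).foldl
          (fun acc dz => acc ++ [(center_x + dist, center_z + dz)]) acc) []
  PySem.List.sorted chunks (fun pos => (pos.1 - center_x) ^ 2 + (pos.2 - center_z) ^ 2) false

-- ===== PRECONDITION & SPEC =====
def Spec_get_chunks_in_radius_py (center_x : Int) (center_z : Int) (radius : Int) (out : List (Int × Int)) : Prop := out = get_chunks_in_radius_py_alt center_x center_z radius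
instance (center_x : Int) (center_z : Int) (radius : Int) (out : List (Int × Int)) : Decidable (Spec_get_chunks_in_radius_py center_x center_z radius out) := by unfold Spec_get_chunks_in_radius_py; infer_instance

-- ===== CLAIM (what is proved, stated in full; the proofs are below) =====
def Claim_equal_get_chunks_in_radius_py : Prop := ∀ (center_x : Int) (center_z : Int) (radius : Int), Dom_get_chunks_in_radius_py center_x center_z radius → Spec_get_chunks_in_radius_py center_x center_z radius (get_chunks_in_radius_py center_x center_z radius)

-- ===== LEMMAS AND PROOFS =====

-- The boundary cells of the ring at distance d, scanned A's way (full square + filter),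
-- equal the same cells emitted B's way (left column, middle rows' two cells, right column).
lemma ring_eq (cx cz d : Int) (hd : 0 ≤ d) :
    (PySem.List.pyRange (-d) (d + 1) 1).flatMap (fun dx =>
      ((PySem.List.pyRange (-d) (d + 1) 1).filter (fun dz => decide (|dx| = d ∨ |dz| = d))).map
        (fun dz => (cx + dx, cz + dz)))
    = (if d = 0 then [(cx, cz)] else
        ((PySem.List.pyRange (-d) (d + 1) 1).map (fun dz => (cx - d, cz + dz)))
        ++ ((PySem.List.pyRange (-d + 1) d 1).flatMap
              (fun dx => [(cx + dx, cz - d), (cx + dx, cz + d)]))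
        ++ ((PySem.List.pyRange (-d) (d + 1) 1).map (fun dz => (cx + d, cz + dz)))) := by
  rcases eq_or_lt_of_le hd with h0 | hpos
  · subst h0
    have h01 : PySem.List.pyRange 0 1 1 = [0] := PySem.List.pyRange_one_singleton 0
    simp [h01]
  · have hsplit : PySem.List.pyRange (-d) (d + 1) 1
        = [-d] ++ PySem.List.pyRange (-d + 1) d 1 ++ [d] := by
      rw [PySem.List.pyRange_one_append (-d) (-d + 1) (d + 1) (by omega) (by omega),
          PySem.List.pyRange_one_append (-d + 1) d (d + 1) (by omega) (by omega),
          PySem.List.pyRange_one_singleton]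
      have h1 : PySem.List.pyRange d (d + 1) 1 = [d] := PySem.List.pyRange_one_singleton d
      rw [h1, List.append_assoc]
    rw [if_neg (by omega), hsplit]
    rw [List.flatMap_append, List.flatMap_append]
    congr 1
    · congr 1
      -- dx = -d : the filter keeps everything
      · simp only [List.flatMap_singleton]
        rw [List.filter_eq_self.mpr (by intro x _; simp [abs_eq hd])]
        apply List.map_congr_left
        intro a _
        simp [sub_eq_add_neg]
      -- middle dx : the filter keeps exactly dz = -d and dz = d
      · rw [List.flatMap_def, List.flatMap_def]
        congr 1
        apply List.map_congr_left
        intro dx hdx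
        rw [PySem.List.mem_pyRange_one] at hdx
        simp only [List.filter_append, List.filter_cons, List.filter_nil]
        have hmid : (PySem.List.pyRange (-d + 1) d 1).filter
            (fun dz => decide (|dx| = d ∨ |dz| = d)) = [] := by
          apply List.filter_eq_nil_iff.mpr
          intro z hz
          rw [PySem.List.mem_pyRange_one] at hz
          simp only [decide_eq_true_eq, abs_eq hd]
          omega
        rw [hmid]
        have h1 : decide (|dx| = d ∨ |(-d)| = d) = true := by simp [abs_eq hd]
        have h2 : decide (|dx| = d ∨ |d| = d) = true := by simp [abs_eq hd]
        rw [h1, h2]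
        simp [sub_eq_add_neg]
    -- dx = d : the filter keeps everything
    · simp only [List.flatMap_singleton]
      rw [List.filter_eq_self.mpr (by intro x _; simp [abs_eq hd])]

-- ===== VERDICT (by name: the statement is the Claim_ definition above) =====
theorem get_chunks_in_radius_py_spec : Claim_equal_get_chunks_in_radius_py := by
  intro cx cz r _
  unfold Spec_get_chunks_in_radius_py
  simp only [get_chunks_in_radius_py, get_chunks_in_radius_py_alt]
  congr 1
  apply PySem.List.foldl_congr_mem
  intro acc d hd
  rw [PySem.List.mem_pyRange_one] at hd
  simp only [PySem.List.foldl_append_ite, PySem.List.foldl_append_eq_flatMap,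
    ← List.map_eq_flatMap]
  rw [ring_eq cx cz d hd.1]
  split
  · rfl
  · simp [List.append_assoc]
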